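-- pv_equiv track=rewrite | github.com/sundaycat/Leetcode-Practice | solution/3. longest-substring-without-repeating-characters-gk.py | follow_up_2
-- ===== SOURCE A (Python) =====
-- def follow_up_2(s, k):
--
--     char_freq = {}
--     max_len = 0
--     slow = 0
--     for fast, char in enumerate(s):
--         # get(): if the char doesn't exist in the dict, assign value of 0 to it, otherwise increase its freq by 1
--         char_freq[char] = char_freq.get(char, 0) + 1
--
--         # move the slow pointer to the next un-duplicate position(移到出现重复的字符的下一位)
--         while char_freq[char] > k:
--             # while moving, decrease the freq by 1 for all the chars that slow visited
--             char_freq[s[slow]] -= 1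
--             slow += 1
--
--         # update the max_len, note that fast is included
--         max_len = max(max_len, fast - slow + 1)
--
--     return max_len
-- ===== SOURCE B (Python) =====
-- def follow_up_2(s, k):
--     # Naive per-start scan: for each start index i, extend with a fresh
--     # frequency dict until some character would exceed k occurrences.
--     n = len(s)
--     best = 0
--     for i in range(n):
--         freq = {}
--         j = i
--         while j < n:
--             c = s[j]
--             f = freq.get(c, 0) + 1
--             if f > k:
--                 break
--             freq[c] = f
--             j += 1
--         best = max(best, j - i)
--     return best
-- ===== Notes on version B (the rewrite author's own statement) =====
-- stated objective: alternative
-- what changed: Replaced the amortized sliding-window (one pass, two pointers, one shared counter) with a naive per-start nested scan that rebuilds a fresh frequency dict for every start index and records the maximal valid extension.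
import Mathlib
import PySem

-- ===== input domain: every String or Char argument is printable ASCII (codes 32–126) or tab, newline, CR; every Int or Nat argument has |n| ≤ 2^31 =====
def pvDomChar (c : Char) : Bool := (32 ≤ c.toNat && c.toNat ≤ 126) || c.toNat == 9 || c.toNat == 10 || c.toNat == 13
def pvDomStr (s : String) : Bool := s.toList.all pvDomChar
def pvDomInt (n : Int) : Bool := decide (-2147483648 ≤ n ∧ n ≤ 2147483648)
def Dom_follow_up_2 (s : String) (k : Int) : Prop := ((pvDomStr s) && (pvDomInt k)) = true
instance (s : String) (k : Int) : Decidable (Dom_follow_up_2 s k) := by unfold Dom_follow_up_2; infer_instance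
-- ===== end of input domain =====

-- B replaces A's amortized sliding window with a naive per-start nested scan (fresh
-- frequency dict per start index); objective: alternative (not faster).

-- ===== PORT A =====
-- the inner 'while char_freq[char] > k' loop; fuel makes it total (inside Pre_ the
-- loop always stops with slow ≤ fast+1, so fuel = len(s)+1 is never exhausted).
-- 'char_freq[s[slow]] -= 1' is ported with getD default 0; inside Pre_ the key is
-- always present, so this is exact where A returns.  pyGet? none = IndexError.
def pvAWhile (k : Int) (l : List Char) (c : Char) :
    Nat → PySem.Dict Char Int → Nat → PySem.Dict Char Int × Nat
  | 0, freq, slow => (freq, slow)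
  | fuel + 1, freq, slow =>
    if freq.getD c 0 > k then
      match PySem.List.pyGet? l (slow : Int) with
      | some d => pvAWhile k l c fuel (freq.insert d (freq.getD d 0 - 1)) (slow + 1)
      | none => (freq, slow)   -- Python raises IndexError here; excluded by Pre_
    else (freq, slow)

-- 'for fast, char in enumerate(s)' as recursion over the remaining chars with the index
def pvALoop (k : Int) (l : List Char) :
    List Char → Nat → PySem.Dict Char Int → Int → Nat → Int
  | [], _, _, maxLen, _ => maxLen
  | ch :: rest, fast, freq, maxLen, slow =>
    let freq1 := freq.insert ch (freq.getD ch 0 + 1)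
    let r := pvAWhile k l ch (l.length + 1) freq1 slow
    pvALoop k l rest (fast + 1) r.1 (max maxLen ((fast : Int) - (r.2 : Int) + 1)) r.2

def follow_up_2 (s : String) (k : Int) : Int :=
  pvALoop k s.toList s.toList 0 PySem.Dict.empty 0 0

-- ===== PORT B =====
-- 'while j < n: c = s[j]; …; j += 1' as recursion on the suffix s[j:]; returns j - i
def pvBExtend (k : Int) : PySem.Dict Char Int → List Char → Nat
  | _, [] => 0
  | freq, c :: cs =>
    let f := freq.getD c 0 + 1
    if f > k then 0 else 1 + pvBExtend k (freq.insert c f) cs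

def follow_up_2_alt (s : String) (k : Int) : Int :=
  (List.range s.toList.length).foldl
    (fun best i => max best ((pvBExtend k PySem.Dict.empty (s.toList.drop i) : Nat) : Int)) 0

-- ===== PRECONDITION & SPEC =====
-- Pre_ excludes k < 0 with non-empty s: there A raises (KeyError/IndexError) while
-- shrinking the window past its end; it never returns a value on those inputs.
def Pre_follow_up_2 (s : String) (k : Int) : Prop := 0 ≤ k ∨ s = ""
instance (s : String) (k : Int) : Decidable (Pre_follow_up_2 s k) := by
  unfold Pre_follow_up_2; infer_instance

def pvWitness_follow_up_2 : String × Int := ("abcba", 1)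

def Spec_follow_up_2 (s : String) (k : Int) (out : Int) : Prop := out = follow_up_2_alt s k
instance (s : String) (k : Int) (out : Int) : Decidable (Spec_follow_up_2 s k out) := by
  unfold Spec_follow_up_2; infer_instance

-- ===== CLAIM (what is proved, stated in full; the proofs are below) =====
def Claim_equal_follow_up_2 : Prop := ∀ (s : String) (k : Int),
  Dom_follow_up_2 s k → Pre_follow_up_2 s k → Spec_follow_up_2 s k (follow_up_2 s k)

-- ===== LEMMAS AND PROOFS =====

-- window validity: every char of w occurs at most k times in w
def pvOk (k : Int) (w : List Char) : Bool := w.all (fun c => decide ((w.count c : Int) ≤ k))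

lemma pvOk_iff (k : Int) (w : List Char) :
    pvOk k w = true ↔ ∀ c ∈ w, (w.count c : Int) ≤ k := by
  simp [pvOk]

lemma pvOk_iff_all (k : Int) (hk : 0 ≤ k) (w : List Char) :
    pvOk k w = true ↔ ∀ c, (w.count c : Int) ≤ k := by
  rw [pvOk_iff]
  constructor
  · intro h c
    by_cases hc : c ∈ w
    · exact h c hc
    · simp [List.count_eq_zero_of_not_mem hc]; exact hk
  · intro h c _; exact h c

lemma pv_take_drop_self (l : List Char) (t : Nat) : (l.take t).drop t = [] := by
  apply List.drop_eq_nil_of_le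
  simp [List.length_take]

-- least start s with the window (l.take t).drop s valid
lemma pvMinS_ex (k : Int) (l : List Char) (t : Nat) :
    ∃ s, pvOk k ((l.take t).drop s) = true :=
  ⟨t, by simp only [pv_take_drop_self]; rfl⟩

def pvMinS (k : Int) (l : List Char) (t : Nat) : Nat :=
  Nat.find (pvMinS_ex k l t)

lemma pvMinS_spec (k : Int) (l : List Char) (t : Nat) :
    pvOk k ((l.take t).drop (pvMinS k l t)) = true :=
  Nat.find_spec (pvMinS_ex k l t)

lemma pvMinS_le (k : Int) (l : List Char) (t : Nat) {s : Nat}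
    (h : pvOk k ((l.take t).drop s) = true) : pvMinS k l t ≤ s :=
  Nat.find_min' (pvMinS_ex k l t) h

lemma pvMinS_le_self (k : Int) (l : List Char) (t : Nat) : pvMinS k l t ≤ t :=
  pvMinS_le k l t (by simp only [pv_take_drop_self]; rfl)

-- counts only shrink when the window start moves right
lemma pv_count_drop_le (w : List Char) (c : Char) {a b : Nat} (h : a ≤ b) :
    (w.drop b).count c ≤ (w.drop a).count c := by
  have heq : w.drop b = (w.drop a).drop (b - a) := by
    rw [List.drop_drop]; congr 1; omega
  rw [heq]
  exact (List.drop_sublist _ _).count_le _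

lemma pv_count_sing (d c : Char) : List.count d [c] = if d = c then 1 else 0 := by
  by_cases h : d = c
  · subst h; simp
  · simp [List.count_eq_zero, h]

lemma pv_count_append_sing (w : List Char) (c d : Char) :
    (w ++ [c]).count d = w.count d + (if d = c then 1 else 0) := by
  rw [List.count_append, pv_count_sing]

lemma pv_getD_insert_count (freq : PySem.Dict Char Int) (p : List Char) (c : Char)
    (hfreq : ∀ d, freq.getD d 0 = (p.count d : Int)) (d : Char) :
    (freq.insert c (freq.getD c 0 + 1)).getD d 0 = (((p ++ [c]).count d : Nat) : Int) := by
  rw [PySem.Dict.getD_insert, pv_count_append_sing]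
  by_cases hd : d = c
  · rw [if_pos hd, if_pos hd, hd, hfreq]; push_cast; ring
  · rw [if_neg hd, if_neg hd, hfreq]; push_cast; ring

lemma pv_count_append_le (k : Int) (p : List Char) (c : Char)
    (hp : ∀ d, (p.count d : Int) ≤ k) (hc : (p.count c : Int) + 1 ≤ k) (d : Char) :
    (((p ++ [c]).count d : Nat) : Int) ≤ k := by
  rw [pv_count_append_sing]
  by_cases hd : d = c
  · subst hd; push_cast; simpa using hc
  · rw [if_neg hd]; simpa using hp d

-- === B-side characterization ===

lemma pvBExtend_le_length (k : Int) (m : List Char) :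
    ∀ (freq : PySem.Dict Char Int), pvBExtend k freq m ≤ m.length := by
  induction m with
  | nil => intro freq; simp [pvBExtend]
  | cons c cs ih =>
    intro freq
    simp only [pvBExtend, List.length_cons]
    split
    · omega
    · have := ih (freq.insert c (freq.getD c 0 + 1)); omega

lemma pvBExtend_ok (k : Int) (m : List Char) :
    ∀ (p : List Char) (freq : PySem.Dict Char Int),
      (∀ d, freq.getD d 0 = (p.count d : Int)) →
      (∀ d, (p.count d : Int) ≤ k) →
      ∀ d, ((p ++ m.take (pvBExtend k freq m)).count d : Int) ≤ k := by
  induction m with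
  | nil => intro p freq _ hp d; simpa using hp d
  | cons c cs ih =>
    intro p freq hfreq hp d
    simp only [pvBExtend]
    split
    · simpa using hp d
    · rename_i hle
      rw [hfreq] at hle
      have hc : (p.count c : Int) + 1 ≤ k := by omega
      have h1 : List.take (1 + pvBExtend k (freq.insert c (freq.getD c 0 + 1)) cs) (c :: cs) =
          c :: cs.take (pvBExtend k (freq.insert c (freq.getD c 0 + 1)) cs) := by
        rw [Nat.add_comm]; rfl
      rw [h1]
      have happ : p ++ c :: cs.take (pvBExtend k (freq.insert c (freq.getD c 0 + 1)) cs) =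
          (p ++ [c]) ++ cs.take (pvBExtend k (freq.insert c (freq.getD c 0 + 1)) cs) := by
        simp
      rw [happ]
      exact ih (p ++ [c]) (freq.insert c (freq.getD c 0 + 1))
        (pv_getD_insert_count freq p c hfreq) (pv_count_append_le k p c hp hc) d

lemma pvBExtend_max (k : Int) (m : List Char) :
    ∀ (t : Nat) (p : List Char) (freq : PySem.Dict Char Int),
      (∀ d, freq.getD d 0 = (p.count d : Int)) →
      t ≤ m.length →
      (∀ d, ((p ++ m.take t).count d : Int) ≤ k) →
      t ≤ pvBExtend k freq m := by
  induction m with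
  | nil =>
    intro t p freq _ ht _
    simp only [List.length_nil] at ht
    simp only [pvBExtend]
    omega
  | cons c cs ih =>
    intro t p freq hfreq ht hcount
    cases t with
    | zero => exact Nat.zero_le _
    | succ u =>
      have hc : (p.count c : Int) + 1 ≤ k := by
        have h := hcount c
        rw [List.take_succ_cons, List.count_append, List.count_cons_self] at h
        push_cast at h; omega
      simp only [pvBExtend]
      rw [if_neg (by rw [hfreq]; omega)]
      have hrec : u ≤ pvBExtend k (freq.insert c (freq.getD c 0 + 1)) cs := by
        refine ih u (p ++ [c]) _ (pv_getD_insert_count freq p c hfreq) (by simpa using ht) ?_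
        intro d
        have h := hcount d
        rw [List.take_succ_cons] at h
        have happ : p ++ c :: cs.take u = (p ++ [c]) ++ cs.take u := by simp
        rw [happ] at h
        exact h
      omega

-- === fold-max helpers ===

lemma pv_foldlMax_le (g : Nat → Nat) (n b : Nat) (h : ∀ i, i < n → g i ≤ b) :
    (List.range n).foldl (fun a i => max a (g i)) 0 ≤ b := by
  induction n with
  | zero => simp
  | succ m ih =>
    rw [List.range_succ, List.foldl_append]
    simp only [List.foldl_cons, List.foldl_nil]
    have h1 := ih (fun i hi => h i (by omega))
    have h2 := h m (by omega)
    omega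

lemma pv_le_foldlMax (g : Nat → Nat) (n i : Nat) (h : i < n) :
    g i ≤ (List.range n).foldl (fun a i => max a (g i)) 0 := by
  induction n with
  | zero => omega
  | succ m ih =>
    rw [List.range_succ, List.foldl_append]
    simp only [List.foldl_cons, List.foldl_nil]
    by_cases hi : i = m
    · subst hi; omega
    · have := ih (by omega); omega

lemma pv_foldlMax_int (g : Nat → Nat) (n : Nat) :
    (List.range n).foldl (fun (a : Int) i => max a ((g i : Nat) : Int)) 0 =
      (((List.range n).foldl (fun a i => max a (g i)) 0 : Nat) : Int) := by
  induction n with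
  | zero => simp
  | succ m ih =>
    rw [List.range_succ, List.foldl_append, List.foldl_append]
    simp only [List.foldl_cons, List.foldl_nil]
    rw [ih, ← Nat.cast_max]

-- length of the best window ending at position t (exclusive)
def pvLend (k : Int) (l : List Char) (t : Nat) : Nat := t - pvMinS k l t

def pvAfold (k : Int) (l : List Char) (t : Nat) : Nat :=
  (List.range t).foldl (fun a e => max a (pvLend k l (e + 1))) 0

def pvE (k : Int) (l : List Char) (i : Nat) : Nat :=
  pvBExtend k PySem.Dict.empty (l.drop i)

def pvBfold (k : Int) (l : List Char) (n : Nat) : Nat :=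
  (List.range n).foldl (fun a i => max a (pvE k l i)) 0

-- === the sliding-window invariant ===

lemma pvAWhile_spec (k : Int) (hk : 0 ≤ k) (l : List Char) (c : Char) (t : Nat)
    (ht : t < l.length) :
    ∀ (fuel s0 : Nat) (freq : PySem.Dict Char Int),
      s0 ≤ t + 1 →
      (∀ d, freq.getD d 0 = (((l.take (t + 1)).drop s0).count d : Int)) →
      (∀ d, d ≠ c → (((l.take (t + 1)).drop s0).count d : Int) ≤ k) →
      t + 1 ≤ s0 + fuel →
      s0 ≤ (pvAWhile k l c fuel freq s0).2 ∧
      (pvAWhile k l c fuel freq s0).2 ≤ t + 1 ∧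
      (∀ d, (pvAWhile k l c fuel freq s0).1.getD d 0 =
        (((l.take (t + 1)).drop (pvAWhile k l c fuel freq s0).2).count d : Int)) ∧
      ((((l.take (t + 1)).drop (pvAWhile k l c fuel freq s0).2).count c : Int) ≤ k) ∧
      (∀ s, s0 ≤ s → s < (pvAWhile k l c fuel freq s0).2 →
        ¬ ((((l.take (t + 1)).drop s).count c : Int) ≤ k)) := by
  intro fuel
  induction fuel with
  | zero =>
    intro s0 freq hs0 hfreq _ hfuel
    have hs0' : s0 = t + 1 := by omega
    subst hs0'
    refine ⟨le_refl _, le_refl _, hfreq, ?_, ?_⟩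
    · rw [show (pvAWhile k l c 0 freq (t + 1)).2 = t + 1 from rfl, pv_take_drop_self]
      simpa using hk
    · exact fun s h1 h2 => absurd (lt_of_le_of_lt h1 h2) (lt_irrefl _)
  | succ fuel ih =>
    intro s0 freq hs0 hfreq hoth hfuel
    by_cases hcond : freq.getD c 0 > k
    · have hcond' : (((l.take (t + 1)).drop s0).count c : Int) > k := by
        rw [← hfreq]; exact hcond
      have hpos : 0 < ((l.take (t + 1)).drop s0).count c := by
        by_contra h
        have h0 : ((l.take (t + 1)).drop s0).count c = 0 := by omega
        rw [h0] at hcond'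
        simp at hcond'
        omega
      have hlen : s0 < (l.take (t + 1)).length := by
        by_contra h
        rw [List.drop_eq_nil_of_le (by omega)] at hpos
        simp at hpos
      have hs0lt : s0 < t + 1 := by
        have := List.length_take_le (t + 1) l; omega
      have hs0l : s0 < l.length := by
        simp [List.length_take] at hlen; omega
      have hget : PySem.List.pyGet? l (s0 : Int) = some l[s0] := by
        rw [PySem.List.pyGet?_natCast]
        exact List.getElem?_eq_getElem hs0l
      have hwin : (l.take (t + 1)).drop s0 = l[s0] :: (l.take (t + 1)).drop (s0 + 1) := by
        rw [List.drop_eq_getElem_cons hlen]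
        congr 1
        simp [List.getElem_take]
      have hred : pvAWhile k l c (fuel + 1) freq s0 =
          pvAWhile k l c fuel (freq.insert l[s0] (freq.getD l[s0] 0 - 1)) (s0 + 1) := by
        simp only [pvAWhile]
        rw [if_pos hcond, hget]
      rw [hred]
      have hres := ih (s0 + 1) (freq.insert l[s0] (freq.getD l[s0] 0 - 1))
        (by omega)
        (by
          intro d
          rw [PySem.Dict.getD_insert]
          by_cases hd : d = l[s0]
          · rw [if_pos hd, hd, hfreq, hwin, List.count_cons_self]
            push_cast; ring
          · rw [if_neg hd, hfreq, hwin]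
            simp [Ne.symm hd])
        (by
          intro d hd
          calc (((l.take (t + 1)).drop (s0 + 1)).count d : Int)
              ≤ (((l.take (t + 1)).drop s0).count d : Int) := by
                exact_mod_cast pv_count_drop_le _ _ (by omega)
            _ ≤ k := hoth d hd)
        (by omega)
      obtain ⟨h1, h2, h3, h4, h5⟩ := hres
      refine ⟨by omega, h2, h3, h4, ?_⟩
      intro s hs1 hs2
      by_cases hss : s = s0
      · subst hss; exact not_le.mpr hcond'
      · exact h5 s (by omega) hs2
    · have hred : pvAWhile k l c (fuel + 1) freq s0 = (freq, s0) := by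
        simp only [pvAWhile]
        rw [if_neg hcond]
      rw [hred]
      refine ⟨le_refl _, hs0, hfreq, ?_, ?_⟩
      · rw [hfreq] at hcond; exact not_lt.mp hcond
      · exact fun s h1 h2 => absurd (lt_of_le_of_lt h1 h2) (lt_irrefl _)

lemma pvALoop_spec (k : Int) (hk : 0 ≤ k) (l : List Char) :
    ∀ (rest : List Char) (t : Nat) (freq : PySem.Dict Char Int) (maxLen : Int) (slow : Nat),
      rest = l.drop t → t ≤ l.length → slow ≤ t →
      (∀ d, freq.getD d 0 = (((l.take t).drop slow).count d : Int)) →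
      pvOk k ((l.take t).drop slow) = true →
      (∀ s, s < slow → ¬ pvOk k ((l.take t).drop s) = true) →
      maxLen = ((pvAfold k l t : Nat) : Int) →
      pvALoop k l rest t freq maxLen slow = ((pvAfold k l l.length : Nat) : Int) := by
  intro rest
  induction rest with
  | nil =>
    intro t freq maxLen slow hrest htle _ _ _ _ hmax
    have hn : l.length ≤ t := by
      by_contra h
      have := List.drop_eq_nil_iff.mp hrest.symm
      omega
    have ht : t = l.length := by omega
    subst ht
    simpa [pvALoop] using hmax
  | cons ch cs ih =>
    intro t freq maxLen slow hrest htle hslow hfreq hok hmin hmax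
    have htlt : t < l.length := by
      by_contra h
      rw [List.drop_eq_nil_of_le (by omega)] at hrest
      simp at hrest
    have hdrop := List.drop_eq_getElem_cons htlt
    rw [← hrest] at hdrop
    have hch : ch = l[t] := by injection hdrop
    have hcs : cs = l.drop (t + 1) := by injection hdrop
    subst hch
    have htake1 : l.take (t + 1) = l.take t ++ [l[t]] := by
      rw [List.take_add_one]
      simp [List.getElem?_eq_getElem htlt]
    have hwinapp : ∀ s, s ≤ t → (l.take (t + 1)).drop s = (l.take t).drop s ++ [l[t]] := by
      intro s hs
      rw [htake1, List.drop_append_of_le_length (by simp [List.length_take]; omega)]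
    have hfreq1 : ∀ d, (freq.insert l[t] (freq.getD l[t] 0 + 1)).getD d 0 =
        (((l.take (t + 1)).drop slow).count d : Int) := by
      intro d
      rw [hwinapp slow hslow]
      exact pv_getD_insert_count freq _ _ hfreq d
    have hoth : ∀ d, d ≠ l[t] → (((l.take (t + 1)).drop slow).count d : Int) ≤ k := by
      intro d hd
      rw [hwinapp slow hslow, pv_count_append_sing, if_neg hd]
      simpa using (pvOk_iff_all k hk _).mp hok d
    have hw := pvAWhile_spec k hk l l[t] t htlt (l.length + 1) slow
      (freq.insert l[t] (freq.getD l[t] 0 + 1)) (by omega) hfreq1 hoth (by omega)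
    simp only [pvALoop]
    set r := pvAWhile k l l[t] (l.length + 1) (freq.insert l[t] (freq.getD l[t] 0 + 1)) slow with hr
    obtain ⟨hr1, hr2, hr3, hr4, hr5⟩ := hw
    have hokr : pvOk k ((l.take (t + 1)).drop r.2) = true := by
      rw [pvOk_iff_all k hk]
      intro d
      by_cases hd : d = l[t]
      · subst hd; exact hr4
      · by_cases hsr : r.2 ≤ t
        · have hmono : ((l.take t).drop r.2).count d ≤ ((l.take t).drop slow).count d :=
            pv_count_drop_le _ _ hr1
          have hb := (pvOk_iff_all k hk _).mp hok d
          rw [hwinapp r.2 hsr, pv_count_append_sing, if_neg hd]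
          push_cast
          omega
        · have h21 : r.2 = t + 1 := by omega
          rw [h21, pv_take_drop_self]
          simpa using hk
    have hminr : ∀ s, s < r.2 → ¬ pvOk k ((l.take (t + 1)).drop s) = true := by
      intro s hs hoks
      by_cases hss : slow ≤ s
      · have hcnt := hr5 s hss hs
        apply hcnt
        by_cases hmem : l[t] ∈ (l.take (t + 1)).drop s
        · exact (pvOk_iff k _).mp hoks _ hmem
        · rw [List.count_eq_zero_of_not_mem hmem]
          simpa using hk
      · have hss' : s < slow := Nat.lt_of_not_le hss
        apply hmin s hss'
        rw [pvOk_iff]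
        intro d hd
        have hst : s ≤ t := by omega
        have hd2 : d ∈ (l.take (t + 1)).drop s := by
          rw [hwinapp s hst]; exact List.mem_append_left _ hd
        have hb := (pvOk_iff k _).mp hoks d hd2
        rw [hwinapp s hst, pv_count_append_sing] at hb
        push_cast at hb ⊢
        split_ifs at hb <;> omega
    have hrmin : pvMinS k l (t + 1) = r.2 :=
      le_antisymm (pvMinS_le k l (t + 1) hokr)
        (by
          by_contra h
          exact hminr _ (Nat.lt_of_not_le h) (pvMinS_spec k l (t + 1)))
    have hlen_eq : (t : Int) - (r.2 : Int) + 1 = ((pvLend k l (t + 1) : Nat) : Int) := by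
      rw [pvLend, hrmin]
      omega
    have hafold : max maxLen ((t : Int) - (r.2 : Int) + 1) = ((pvAfold k l (t + 1) : Nat) : Int) := by
      rw [hmax, hlen_eq, ← Nat.cast_max]
      congr 1
      rw [pvAfold, pvAfold, List.range_succ, List.foldl_append]
      simp
    exact ih (t + 1) r.1 (max maxLen ((t : Int) - (r.2 : Int) + 1)) r.2 hcs (by omega) hr2
      hr3 hokr hminr hafold

-- === A's result and B's result both equal the same fold ===

lemma pvA_eq (k : Int) (hk : 0 ≤ k) (s : String) :
    follow_up_2 s k = ((pvAfold k s.toList s.toList.length : Nat) : Int) := by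
  unfold follow_up_2
  refine pvALoop_spec k hk s.toList s.toList 0 PySem.Dict.empty 0 0 rfl (Nat.zero_le _)
    (le_refl 0) ?_ ?_ ?_ ?_
  · intro d; simp [PySem.Dict.getD_empty]
  · rfl
  · intro s hs; exact absurd hs (by omega)
  · simp [pvAfold]

lemma pvB_eq (k : Int) (s : String) :
    follow_up_2_alt s k = ((pvBfold k s.toList s.toList.length : Nat) : Int) := by
  rw [follow_up_2_alt, pvBfold]
  exact pv_foldlMax_int (pvE k s.toList) s.toList.length

lemma pv_drop_take (l : List Char) (s t : Nat) :
    (l.take t).drop s = (l.drop s).take (t - s) := List.drop_take ..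

lemma pvAfold_le_Bfold (k : Int) (hk : 0 ≤ k) (l : List Char) :
    pvAfold k l l.length ≤ pvBfold k l l.length := by
  apply pv_foldlMax_le (fun e => pvLend k l (e + 1))
  intro e he
  by_cases h0 : pvLend k l (e + 1) = 0
  · rw [h0]; exact Nat.zero_le _
  · have hs0t : pvMinS k l (e + 1) < e + 1 := by
      have := pvMinS_le_self k l (e + 1)
      rw [pvLend] at h0
      omega
    have hs0n : pvMinS k l (e + 1) < l.length := by omega
    have hval : (e + 1) - pvMinS k l (e + 1) ≤ pvE k l (pvMinS k l (e + 1)) := by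
      refine pvBExtend_max k (l.drop (pvMinS k l (e + 1))) ((e + 1) - pvMinS k l (e + 1)) []
        PySem.Dict.empty ?_ ?_ ?_
      · intro d; simp [PySem.Dict.getD_empty]
      · simp; omega
      · intro d
        have h := (pvOk_iff_all k hk _).mp (pvMinS_spec k l (e + 1)) d
        rw [pv_drop_take] at h
        simpa using h
    calc pvLend k l (e + 1) = (e + 1) - pvMinS k l (e + 1) := rfl
      _ ≤ pvE k l (pvMinS k l (e + 1)) := hval
      _ ≤ pvBfold k l l.length := pv_le_foldlMax (pvE k l) l.length _ hs0n

lemma pvBfold_le_Afold (k : Int) (hk : 0 ≤ k) (l : List Char) :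
    pvBfold k l l.length ≤ pvAfold k l l.length := by
  apply pv_foldlMax_le (pvE k l)
  intro i hi
  by_cases h0 : pvE k l i = 0
  · rw [h0]; exact Nat.zero_le _
  · have hElen : pvE k l i ≤ l.length - i := by
      have := pvBExtend_le_length k (l.drop i) PySem.Dict.empty
      simpa using this
    have htn : i + pvE k l i ≤ l.length := by omega
    have hok : pvOk k ((l.take (i + pvE k l i)).drop i) = true := by
      rw [pvOk_iff_all k hk]
      intro d
      rw [pv_drop_take]
      have hti : i + pvE k l i - i = pvE k l i := by omega
      rw [hti]
      have h := pvBExtend_ok k (l.drop i) [] PySem.Dict.empty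
        (by intro d; simp [PySem.Dict.getD_empty]) (by intro d; simpa using hk) d
      simpa [pvE] using h
    have hminle : pvMinS k l (i + pvE k l i) ≤ i := pvMinS_le k l (i + pvE k l i) hok
    calc pvE k l i ≤ (i + pvE k l i) - pvMinS k l (i + pvE k l i) := by omega
      _ = pvLend k l ((i + pvE k l i - 1) + 1) := by
          have harg : i + pvE k l i - 1 + 1 = i + pvE k l i := by omega
          rw [pvLend, harg]
      _ ≤ pvAfold k l l.length :=
          pv_le_foldlMax (fun e => pvLend k l (e + 1)) l.length (i + pvE k l i - 1) (by omega)

-- ===== VERDICT (by name: the statement is the Claim_ definition above) =====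
theorem follow_up_2_spec : Claim_equal_follow_up_2 := by
  intro s k _ hpre
  unfold Spec_follow_up_2
  rcases hpre with hk | hs
  · rw [pvA_eq k hk s, pvB_eq k s]
    congr 1
    exact le_antisymm (pvAfold_le_Bfold k hk s.toList) (pvBfold_le_Afold k hk s.toList)
  · subst hs; rfl
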